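-- pv_equiv track=rewrite | github.com/kennedyshead/prove | prove-py/src/prove/testing.py | _strip_main
-- ===== SOURCE A (Python) =====
-- def _strip_main(c_code: str) -> str:
--     """Remove the main() function from generated C code."""
--     lines = c_code.split("\n")
--     result: list[str] = []
--     in_main = False
--     brace_depth = 0
--
--     for line in lines:
--         stripped = line.strip()
--         if stripped.startswith("int main(") and not in_main:
--             in_main = True
--             brace_depth = 0
--             if "{" in stripped:
--                 brace_depth += stripped.count("{")
--                 brace_depth -= stripped.count("}")
--             continue
--
--         if in_main:
--             brace_depth += stripped.count("{")
--             brace_depth -= stripped.count("}")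
--             if brace_depth <= 0:
--                 in_main = False
--             continue
--
--         result.append(line)
--
--     return "\n".join(result)
-- ===== SOURCE B (Python) =====
-- def _strip_main(c_code: str) -> str:
--     """Remove the main() function from generated C code."""
--     lines = c_code.split("\n")
--     stripped = [l.strip() for l in lines]
--     # prefix-sum array of brace balances: pref[k] = balance of lines[0:k]
--     pref = [0]
--     for s in stripped:
--         pref.append(pref[-1] + s.count("{") - s.count("}"))
--     n = len(lines)
--     keep: list[str] = []
--     i = 0
--     while i < n:
--         if stripped[i].startswith("int main("):
--             # block depth after line j is pref[j+1] - base
--             base = pref[i] if "{" in stripped[i] else pref[i + 1]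
--             j = i + 1
--             while j < n and pref[j + 1] - base > 0:
--                 j += 1
--             i = j + 1
--         else:
--             keep.append(lines[i])
--             i += 1
--     return "\n".join(keep)
-- ===== Notes on version B (the rewrite author's own statement) =====
-- stated objective: alternative
-- what changed: B works in staged passes: it precomputes the stripped lines and a prefix-sum array of brace balances, then an index walker finds each main() block's end by comparing precomputed prefix sums and skips the whole index interval, instead of A's single fold with an in_main flag and a running brace_depth counter.
import Mathlib
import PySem

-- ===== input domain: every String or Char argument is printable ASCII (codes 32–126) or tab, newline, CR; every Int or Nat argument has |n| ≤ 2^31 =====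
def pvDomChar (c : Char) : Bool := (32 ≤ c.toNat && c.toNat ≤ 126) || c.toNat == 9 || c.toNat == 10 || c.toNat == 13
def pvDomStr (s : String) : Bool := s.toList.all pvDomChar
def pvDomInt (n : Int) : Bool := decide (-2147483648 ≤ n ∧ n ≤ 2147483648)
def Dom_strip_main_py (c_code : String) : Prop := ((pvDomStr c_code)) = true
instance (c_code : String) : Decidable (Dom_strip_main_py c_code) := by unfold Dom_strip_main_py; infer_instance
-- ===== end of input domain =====

-- B replaces A's in_main/brace_depth state machine by staged passes: stripped lines and a
-- prefix-sum array of brace balances are precomputed, then an index walker skips each main()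
-- block by comparing prefix sums; same behaviour, same cost (objective: alternative).

-- ===== PORT A =====
-- for-loop state: (result, in_main, brace_depth)
def stripMainStepA (st : List String × Bool × Int) (line : String) : List String × Bool × Int :=
  let stripped := PySem.Str.strip line
  if PySem.Str.startswith stripped "int main(" && !st.2.1 then
    let d : Int := if PySem.Str.isIn "{" stripped then
        0 + (PySem.Str.count stripped "{" : Int) - (PySem.Str.count stripped "}" : Int)
      else 0
    (st.1, true, d)
  else if st.2.1 then
    let d : Int := st.2.2 + (PySem.Str.count stripped "{" : Int) - (PySem.Str.count stripped "}" : Int)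
    if d ≤ 0 then (st.1, false, d) else (st.1, true, d)
  else (st.1 ++ [line], st.2.1, st.2.2)

def strip_main_py (c_code : String) : String :=
  PySem.Str.join "\n"
    (((PySem.Str.split? c_code "\n").getD []).foldl stripMainStepA ([], false, 0)).1

-- ===== PORT B =====
-- pref.append(pref[-1] + s.count("{") - s.count("}")) loop
def altBuildPref (stripped : List String) : List Int :=
  stripped.foldl
    (fun p s => p ++ [p.getLast! + (PySem.Str.count s "{" : Int) - (PySem.Str.count s "}" : Int)])
    [0]

-- inner while loop: advance j while j < n and pref[j+1] - base > 0
def altFindEnd (pref : List Int) (base : Int) (n j : Nat) : Nat :=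
  if j < n ∧ pref.getD (j + 1) 0 - base > 0 then altFindEnd pref base n (j + 1) else j
  termination_by n - j
  decreasing_by omega

theorem altFindEnd_ge (pref : List Int) (base : Int) (n j : Nat) :
    j ≤ altFindEnd pref base n j := by
  unfold altFindEnd
  split
  · have := altFindEnd_ge pref base n (j + 1); omega
  · exact Nat.le_refl j
  termination_by n - j
  decreasing_by omega

-- outer while loop: keep a non-main line and step, or jump past a main() block
def altGo (lines stripped : List String) (pref : List Int) (n i : Nat) : List String :=
  if i < n then
    if PySem.Str.startswith (stripped.getD i "") "int main(" then
      let base := if PySem.Str.isIn "{" (stripped.getD i "") then pref.getD i 0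
                  else pref.getD (i + 1) 0
      altGo lines stripped pref n (altFindEnd pref base n (i + 1) + 1)
    else lines.getD i "" :: altGo lines stripped pref n (i + 1)
  else []
  termination_by n - i
  decreasing_by
  · have h2 := altFindEnd_ge pref
      (if _h : PySem.Str.isIn "{" (stripped.getD i "") = true then pref.getD i 0
       else pref.getD (i + 1) 0) n (i + 1)
    omega
  · omega

def strip_main_py_alt (c_code : String) : String :=
  let lines := (PySem.Str.split? c_code "\n").getD []
  let stripped := lines.map (fun l => PySem.Str.strip l)
  let pref := altBuildPref stripped
  PySem.Str.join "\n" (altGo lines stripped pref lines.length 0)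

-- ===== PRECONDITION & SPEC =====
def Spec_strip_main_py (c_code : String) (out : String) : Prop := out = strip_main_py_alt c_code
instance (c_code : String) (out : String) : Decidable (Spec_strip_main_py c_code out) := by unfold Spec_strip_main_py; infer_instance

-- ===== CLAIM (what is proved, stated in full; the proofs are below) =====
def Claim_equal_strip_main_py : Prop := ∀ (c_code : String), Dom_strip_main_py c_code → Spec_strip_main_py c_code (strip_main_py c_code)

-- ===== LEMMAS AND PROOFS =====

-- brace-balance delta of one (stripped) line
def lineDelta (s : String) : Int :=
  (PySem.Str.count s "{" : Int) - (PySem.Str.count s "}" : Int)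

-- reference intermediate form of A's loop: block-consuming recursion over the line list
def mainSkip (depth : Int) : List String → List String
  | [] => []
  | l :: rest =>
    let t := PySem.Str.strip l
    let d := depth + (PySem.Str.count t "{" : Int) - (PySem.Str.count t "}" : Int)
    if d ≤ 0 then rest else mainSkip d rest

theorem mainSkip_length_le (depth : Int) (xs : List String) :
    (mainSkip depth xs).length ≤ xs.length := by
  induction xs generalizing depth with
  | nil => simp [mainSkip]
  | cons l rest ih =>
    simp only [mainSkip]
    split
    · simp
    · exact Nat.le_succ_of_le (ih _)

def mainGo : List String → List String
  | [] => []
  | l :: rest =>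
    let s := PySem.Str.strip l
    if PySem.Str.startswith s "int main(" then
      mainGo (mainSkip
        (if PySem.Str.isIn "{" s then
          (PySem.Str.count s "{" : Int) - (PySem.Str.count s "}" : Int) else 0) rest)
    else l :: mainGo rest
  termination_by xs => xs.length
  decreasing_by
  · exact Nat.lt_succ_of_le (mainSkip_length_le _ rest)
  · simp

-- loop invariant for A: the fold from state (res, b, d) produces res ++ mainGo of the rest
theorem stripMain_fold_eq (lines : List String) : ∀ (res : List String) (b : Bool) (d : Int),
    (lines.foldl stripMainStepA (res, b, d)).1
      = res ++ mainGo (if b then mainSkip d lines else lines) := by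
  induction lines with
  | nil =>
    intro res b d
    cases b <;> simp [mainSkip, mainGo]
  | cons l rest ih =>
    intro res b d
    cases b with
    | true =>
      have hstep : ∀ st : List String × Bool × Int, st.2.1 = true →
          stripMainStepA st l
            = (if st.2.2 + (PySem.Str.count (PySem.Str.strip l) "{" : Int)
                  - (PySem.Str.count (PySem.Str.strip l) "}" : Int) ≤ 0 then
                (st.1, false, st.2.2 + (PySem.Str.count (PySem.Str.strip l) "{" : Int)
                  - (PySem.Str.count (PySem.Str.strip l) "}" : Int))
              else (st.1, true, st.2.2 + (PySem.Str.count (PySem.Str.strip l) "{" : Int)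
                  - (PySem.Str.count (PySem.Str.strip l) "}" : Int))) := by
        intro st hm
        simp [stripMainStepA, hm]
      rw [List.foldl_cons, hstep (res, true, d) rfl]
      set d' : Int := d + (PySem.Str.count (PySem.Str.strip l) "{" : Int)
        - (PySem.Str.count (PySem.Str.strip l) "}" : Int) with hd'
      have hskip : mainSkip d (l :: rest)
          = if d' ≤ 0 then rest else mainSkip d' rest := by
        simp only [mainSkip]
        rw [← hd']
      by_cases hle : d' ≤ 0
      · rw [if_pos hle, ih res false d']
        simp [hskip, hle]
      · rw [if_neg hle, ih res true d']
        simp [hskip, hle]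
    | false =>
      by_cases hs : PySem.Chars.startswith (PySem.Chars.strip l.toList)
          ['i','n','t',' ','m','a','i','n','('] = true
      · have hstep : stripMainStepA (res, false, d) l
            = (res, true,
               if PySem.Str.isIn "{" (PySem.Str.strip l) then
                 0 + (PySem.Str.count (PySem.Str.strip l) "{" : Int)
                   - (PySem.Str.count (PySem.Str.strip l) "}" : Int)
               else 0) := by
          simp [stripMainStepA, hs]
        have hgo : mainGo (l :: rest)
            = mainGo (mainSkip
                (if PySem.Str.isIn "{" (PySem.Str.strip l) then
                  (PySem.Str.count (PySem.Str.strip l) "{" : Int)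
                    - (PySem.Str.count (PySem.Str.strip l) "}" : Int)
                 else 0) rest) := by
          rw [mainGo]
          simp [hs]
        rw [List.foldl_cons, hstep,
          ih res true (if PySem.Str.isIn "{" (PySem.Str.strip l) then
            0 + (PySem.Str.count (PySem.Str.strip l) "{" : Int)
              - (PySem.Str.count (PySem.Str.strip l) "}" : Int) else 0)]
        simp only [Bool.false_eq_true, if_false, if_true]
        rw [hgo]
        by_cases hbr : PySem.Chars.isIn ['{'] (PySem.Chars.strip l.toList) = true
        · simp [hbr]
        · simp [hbr]
      · have hstep : stripMainStepA (res, false, d) l = (res ++ [l], false, d) := by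
          simp [stripMainStepA, hs]
        have hgo : mainGo (l :: rest) = l :: mainGo rest := by
          rw [mainGo]
          simp [hs]
        rw [List.foldl_cons, hstep, ih (res ++ [l]) false d]
        simp only [Bool.false_eq_true, if_false]
        rw [hgo]
        simp

-- prefix balance: sum of deltas of the first k stripped lines
def prefSum (ss : List String) (k : Nat) : Int := ((ss.take k).map lineDelta).sum

def prefTail (c : Int) : List String → List Int
  | [] => []
  | s :: ss => (c + lineDelta s) :: prefTail (c + lineDelta s) ss

theorem altBuildPref_aux (ss : List String) : ∀ (p : List Int), p ≠ [] →
    ss.foldl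
      (fun p s => p ++ [p.getLast! + (PySem.Str.count s "{" : Int) - (PySem.Str.count s "}" : Int)])
      p
    = p ++ prefTail p.getLast! ss := by
  induction ss with
  | nil => intro p _; simp [prefTail]
  | cons s ss ih =>
    intro p hp
    rw [List.foldl_cons, ih _ (by simp)]
    have hlast : (p ++ [p.getLast! + (PySem.Str.count s "{" : Int)
        - (PySem.Str.count s "}" : Int)]).getLast!
        = p.getLast! + (PySem.Str.count s "{" : Int) - (PySem.Str.count s "}" : Int) := by
      simp
    rw [hlast]
    simp only [prefTail, List.append_assoc, List.singleton_append]
    have : p.getLast! + (PySem.Str.count s "{" : Int) - (PySem.Str.count s "}" : Int)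
        = p.getLast! + lineDelta s := by
      unfold lineDelta; ring
    rw [this]

theorem prefTail_getD (ss : List String) : ∀ (c : Int) (k : Nat), k < ss.length →
    (prefTail c ss).getD k 0 = c + prefSum ss (k + 1) := by
  induction ss with
  | nil => intro c k hk; simp at hk
  | cons s ss ih =>
    intro c k hk
    cases k with
    | zero => simp [prefTail, prefSum, lineDelta]
    | succ k =>
      have hk' : k < ss.length := by simpa using hk
      have : (prefTail c (s :: ss)).getD (k + 1) 0
          = (prefTail (c + lineDelta s) ss).getD k 0 := by
        simp [prefTail]
      rw [this, ih _ _ hk']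
      have : prefSum (s :: ss) (k + 2) = lineDelta s + prefSum ss (k + 1) := by
        simp [prefSum, List.take_succ_cons]
      rw [this]; ring

theorem altBuildPref_getD (ss : List String) (k : Nat) (hk : k ≤ ss.length) :
    (altBuildPref ss).getD k 0 = prefSum ss k := by
  unfold altBuildPref
  rw [altBuildPref_aux ss [0] (by simp)]
  cases k with
  | zero => simp [prefSum]
  | succ k =>
    have hk' : k < ss.length := by omega
    have : (([0] : List Int) ++ prefTail ([0] : List Int).getLast! ss).getD (k + 1) 0
        = (prefTail ([0] : List Int).getLast! ss).getD k 0 := by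
      simp
    rw [this]
    have hl : ([0] : List Int).getLast! = 0 := by simp
    rw [hl, prefTail_getD ss 0 k hk']
    ring

theorem prefSum_succ (ss : List String) (k : Nat) (hk : k < ss.length) :
    prefSum ss (k + 1) = prefSum ss k + lineDelta (ss.getD k "") := by
  unfold prefSum
  rw [List.getD_eq_getElem ss "" hk, List.map_take, List.map_take, List.take_succ,
    List.getElem?_map, List.getElem?_eq_getElem hk]
  simp

theorem skip_eq (lines : List String) : ∀ (fuel j : Nat) (base : Int),
    lines.length - j ≤ fuel →
    mainSkip (prefSum (lines.map (fun l => PySem.Str.strip l)) j - base) (lines.drop j)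
      = lines.drop (altFindEnd (altBuildPref (lines.map (fun l => PySem.Str.strip l)))
          base lines.length j + 1) := by
  intro fuel
  induction fuel with
  | zero =>
    intro j base hf
    have hj : lines.length ≤ j := by omega
    rw [altFindEnd]
    have : ¬ (j < lines.length ∧
        (altBuildPref (lines.map (fun l => PySem.Str.strip l))).getD (j + 1) 0 - base > 0) := by
      intro h; omega
    rw [if_neg this]
    rw [List.drop_eq_nil_of_le hj, List.drop_eq_nil_of_le (by omega)]
    simp [mainSkip]
  | succ fuel ih =>
    intro j base hf
    by_cases hj : j < lines.length
    · set ss := lines.map (fun l => PySem.Str.strip l) with hss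
      have hlen : ss.length = lines.length := by simp [hss]
      have hdrop : lines.drop j = lines[j] :: lines.drop (j + 1) :=
        List.drop_eq_getElem_cons hj
      have hssj : ss.getD j "" = PySem.Str.strip lines[j] := by
        rw [List.getD_eq_getElem ss "" (by omega)]
        simp [hss]
      have hstep : prefSum ss j - base
          + (PySem.Str.count (PySem.Str.strip lines[j]) "{" : Int)
          - (PySem.Str.count (PySem.Str.strip lines[j]) "}" : Int)
          = prefSum ss (j + 1) - base := by
        rw [prefSum_succ ss j (by omega), hssj]
        unfold lineDelta; ring
      have hpref : (altBuildPref ss).getD (j + 1) 0 = prefSum ss (j + 1) :=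
        altBuildPref_getD ss (j + 1) (by omega)
      rw [hdrop]
      simp only [mainSkip]
      rw [hstep]
      by_cases hle : prefSum ss (j + 1) - base ≤ 0
      · rw [if_pos hle, altFindEnd]
        have : ¬ (j < lines.length ∧ (altBuildPref ss).getD (j + 1) 0 - base > 0) := by
          rw [hpref]; intro h; omega
        rw [if_neg this]
      · rw [if_neg hle, altFindEnd]
        have : (j < lines.length ∧ (altBuildPref ss).getD (j + 1) 0 - base > 0) := by
          rw [hpref]; exact ⟨hj, by omega⟩
        rw [if_pos this]
        exact ih (j + 1) base (by omega)
    · rw [altFindEnd]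
      have : ¬ (j < lines.length ∧
          (altBuildPref (lines.map (fun l => PySem.Str.strip l))).getD (j + 1) 0 - base > 0) := by
        intro h; omega
      rw [if_neg this]
      rw [List.drop_eq_nil_of_le (by omega), List.drop_eq_nil_of_le (by omega)]
      simp [mainSkip]

theorem altGo_eq_mainGo_aux (lines : List String) : ∀ (fuel i : Nat),
    lines.length - i ≤ fuel →
    altGo lines (lines.map (fun l => PySem.Str.strip l))
        (altBuildPref (lines.map (fun l => PySem.Str.strip l))) lines.length i
      = mainGo (lines.drop i) := by
  intro fuel
  induction fuel with
  | zero =>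
    intro i hf
    have hi : lines.length ≤ i := by omega
    rw [altGo, if_neg (by omega), List.drop_eq_nil_of_le hi, mainGo]
  | succ fuel ih =>
    intro i hf
    by_cases hi : i < lines.length
    · set ss := lines.map (fun l => PySem.Str.strip l) with hss
      have hdrop : lines.drop i = lines[i] :: lines.drop (i + 1) :=
        List.drop_eq_getElem_cons hi
      have hssi : ss.getD i "" = PySem.Str.strip lines[i] := by
        rw [List.getD_eq_getElem ss "" (by simpa [hss] using hi)]
        simp [hss]
      rw [altGo, if_pos hi, hdrop, mainGo]
      simp only [hssi]
      by_cases hmain : PySem.Str.startswith (PySem.Str.strip lines[i]) "int main(" = true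
      · rw [if_pos hmain, if_pos hmain]
        set base : Int := if PySem.Str.isIn "{" (PySem.Str.strip lines[i]) then
            (altBuildPref ss).getD i 0 else (altBuildPref ss).getD (i + 1) 0 with hbase
        have hseed : (if PySem.Str.isIn "{" (PySem.Str.strip lines[i]) then
              (PySem.Str.count (PySem.Str.strip lines[i]) "{" : Int)
                - (PySem.Str.count (PySem.Str.strip lines[i]) "}" : Int)
            else 0)
            = prefSum ss (i + 1) - base := by
        -- depth seeded on the header line equals pref[i+1] - base for B's choice of base
          have hps : prefSum ss (i + 1) = prefSum ss i + lineDelta (PySem.Str.strip lines[i]) := by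
            rw [prefSum_succ ss i (by simpa [hss] using hi), hssi]
          by_cases hbr : PySem.Str.isIn "{" (PySem.Str.strip lines[i]) = true
          · rw [hbase, if_pos hbr, if_pos hbr,
              altBuildPref_getD ss i (by simp [hss]; omega), hps]
            unfold lineDelta; ring
          · rw [hbase, if_neg hbr, if_neg hbr,
              altBuildPref_getD ss (i + 1) (by simp [hss]; omega)]
            ring
        have hskip := skip_eq lines (lines.length - (i + 1)) (i + 1) base (by omega)
        rw [hseed, ← hss] at *
        rw [hskip]
        have hge := altFindEnd_ge (altBuildPref ss) base lines.length (i + 1)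
        exact ih _ (by omega)
      · rw [if_neg hmain, if_neg hmain]
        rw [List.getD_eq_getElem lines "" hi]
        rw [ih (i + 1) (by omega)]
    · rw [altGo, if_neg (by omega), List.drop_eq_nil_of_le (by omega), mainGo]

theorem altGo_eq_mainGo (lines : List String) (i : Nat) (_hi : i ≤ lines.length) :
    altGo lines (lines.map (fun l => PySem.Str.strip l))
        (altBuildPref (lines.map (fun l => PySem.Str.strip l))) lines.length i
      = mainGo (lines.drop i) :=
  altGo_eq_mainGo_aux lines (lines.length - i) i (Nat.le_refl _)

-- ===== VERDICT (by name: the statement is the Claim_ definition above) =====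
theorem strip_main_py_spec : Claim_equal_strip_main_py := by
  intro c_code _
  unfold Spec_strip_main_py strip_main_py strip_main_py_alt
  rw [stripMain_fold_eq]
  show _ = PySem.Str.join "\n"
    (altGo ((PySem.Str.split? c_code "\n").getD [])
      (((PySem.Str.split? c_code "\n").getD []).map (fun l => PySem.Str.strip l))
      (altBuildPref (((PySem.Str.split? c_code "\n").getD []).map (fun l => PySem.Str.strip l)))
      ((PySem.Str.split? c_code "\n").getD []).length 0)
  rw [altGo_eq_mainGo _ 0 (Nat.zero_le _)]
  simp
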